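-- pv_equiv track=rewrite | github.com/inahaurylava/aqa_project1 | lesson8/Home_task8.py | sort_numbers_lexicographically
-- ===== SOURCE A (Python) =====
-- def sort_numbers_lexicographically(input_string):
--
--     numbers_name = {
--     0:"zero", 1:"one", 2:"two", 3:"three", 4:"four", 5:"five", 6:"six", 7:"seven", 8:"eight", 9:"nine", 10:"ten"
--     }
--     try:
--         numbers = [int(x) for x in input_string.split()]
--         if not all(0 <= num <= 10 for num in numbers):
--             return "Error: Numbers must be between 0 and 10"
--         if len(numbers) > 100:
--             return "Error: Too many numbers"
--
--         sorted_numbers = sorted(numbers, key=lambda x: numbers_name[x])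
--         return " ".join(map(str, sorted_numbers))
--
--     except ValueError:
--         return "Error: Invalid input.  Please enter integers separated by spaces."
-- ===== SOURCE B (Python) =====
-- ALPHA_ORDER = (8, 5, 4, 9, 1, 7, 6, 10, 3, 2, 0)  # eight,five,four,nine,one,seven,six,ten,three,two,zero
--
-- def sort_numbers_lexicographically(input_string):
--     try:
--         numbers = [int(x) for x in input_string.split()]
--     except ValueError:
--         return "Error: Invalid input.  Please enter integers separated by spaces."
--     if any(n < 0 or n > 10 for n in numbers):
--         return "Error: Numbers must be between 0 and 10"
--     if len(numbers) > 100: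
--         return "Error: Too many numbers"
--     counts = {}
--     for n in numbers:
--         counts[n] = counts.get(n, 0) + 1
--     out = []
--     for v in ALPHA_ORDER:
--         out.extend([v] * counts.get(v, 0))
--     return " ".join(map(str, out))
-- ===== Notes on version B (the rewrite author's own statement) =====
-- stated objective: alternative
-- what changed: Replaces the comparison sort keyed by number words with a counting sort: tally each value in a dict, then emit the values in the fixed word-alphabetical order [8,5,4,9,1,7,6,10,3,2,0].
import Mathlib
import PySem

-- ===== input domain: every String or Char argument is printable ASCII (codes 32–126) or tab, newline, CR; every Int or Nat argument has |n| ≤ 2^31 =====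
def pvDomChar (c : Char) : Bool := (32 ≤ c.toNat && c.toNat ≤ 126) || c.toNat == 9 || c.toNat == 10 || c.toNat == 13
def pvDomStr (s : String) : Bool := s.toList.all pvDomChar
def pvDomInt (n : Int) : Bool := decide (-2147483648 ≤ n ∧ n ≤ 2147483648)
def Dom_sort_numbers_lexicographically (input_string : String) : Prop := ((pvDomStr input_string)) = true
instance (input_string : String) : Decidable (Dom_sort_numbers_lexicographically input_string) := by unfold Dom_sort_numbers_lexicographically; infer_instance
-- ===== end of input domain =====

-- ===== PORT A =====
-- B replaces A's comparison sort (key = English number word) by a counting sort over the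
-- fixed word-alphabetical value order; parse/validation prologue behaviour is unchanged.

def pvNumbersName : PySem.Dict Int String :=
  PySem.Dict.mk [(0, "zero"), (1, "one"), (2, "two"), (3, "three"), (4, "four"), (5, "five"),
                 (6, "six"), (7, "seven"), (8, "eight"), (9, "nine"), (10, "ten")]

-- key = lambda x: numbers_name[x]; the KeyError case is unreachable (range checked first),
-- `.getD ""` only totalizes it
def pvKeyA (x : Int) : String := (pvNumbersName.get? x).getD ""

def sort_numbers_lexicographically (input_string : String) : String :=
  let parsed := (PySem.Str.split₀ input_string).map PySem.Int.ofStr?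
  if parsed.all Option.isSome then
    -- int(x) succeeded on every token
    let numbers := parsed.map (fun o => o.getD 0)
    if !(numbers.all (fun num => decide (0 ≤ num ∧ num ≤ 10))) then
      "Error: Numbers must be between 0 and 10"
    else if numbers.length > 100 then
      "Error: Too many numbers"
    else
      PySem.Str.join " " ((PySem.List.sorted numbers pvKeyA).map PySem.Int.toStr)
  else
    "Error: Invalid input.  Please enter integers separated by spaces."

-- ===== PORT B =====
def pvAlphaOrder : List Int := [8, 5, 4, 9, 1, 7, 6, 10, 3, 2, 0]

def sort_numbers_lexicographically_alt (input_string : String) : String :=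
  let parsed := (PySem.Str.split₀ input_string).map PySem.Int.ofStr?
  match parsed.all Option.isSome with
  | false => "Error: Invalid input.  Please enter integers separated by spaces."
  | true =>
    let numbers := parsed.map (fun o => o.getD 0)
    if numbers.any (fun n => decide (n < 0 ∨ n > 10)) then
      "Error: Numbers must be between 0 and 10"
    else if numbers.length > 100 then
      "Error: Too many numbers"
    else
      let counts := numbers.foldl (fun d n => d.insert n (d.getD n 0 + 1)) PySem.Dict.empty
      let out := pvAlphaOrder.foldl
        (fun acc v => acc ++ PySem.List.pyRepeat [v] (counts.getD v 0)) []
      PySem.Str.join " " (out.map PySem.Int.toStr)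

-- ===== PRECONDITION & SPEC =====
def Spec_sort_numbers_lexicographically (input_string : String) (out : String) : Prop := out = sort_numbers_lexicographically_alt input_string
instance (input_string : String) (out : String) : Decidable (Spec_sort_numbers_lexicographically input_string out) := by unfold Spec_sort_numbers_lexicographically; infer_instance

-- ===== CLAIM (what is proved, stated in full; the proofs are below) =====
def Claim_equal_sort_numbers_lexicographically : Prop := ∀ (input_string : String), Dom_sort_numbers_lexicographically input_string → Spec_sort_numbers_lexicographically input_string (sort_numbers_lexicographically input_string)

-- ===== LEMMAS AND PROOFS =====

-- B's counter/extend loops, rewritten as a flatMap of replicates of the exact counts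
theorem pvB_out_eq (numbers : List Int) :
    pvAlphaOrder.foldl
      (fun acc v => acc ++ PySem.List.pyRepeat [v]
        ((numbers.foldl (fun d n => d.insert n (d.getD n 0 + 1)) PySem.Dict.empty).getD v 0)) []
    = pvAlphaOrder.flatMap (fun v => List.replicate (numbers.count v) v) := by
  simp [PySem.List.pyRepeat_singleton, PySem.Dict.getD_foldl_insert_add_one,
    PySem.Dict.getD_empty, List.flatMap_def]

-- blocks of equal values listed in key-ascending block order are key-sorted
theorem pvPairwise_flatMap (vs : List Int) (n : Int → Nat) (key : Int → String)
    (h : vs.Pairwise (fun a b => key a ≤ key b)) :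
    (vs.flatMap fun v => List.replicate (n v) v).Pairwise (fun a b => key a ≤ key b) := by
  induction vs with
  | nil => simp
  | cons v t ih =>
    rw [List.flatMap_cons, List.pairwise_append]
    obtain ⟨h1, h2⟩ := List.pairwise_cons.mp h
    refine ⟨List.pairwise_replicate.mpr (Or.inr le_rfl), ih h2, ?_⟩
    intro a ha b hb
    obtain ⟨w, hw, hbw⟩ := List.mem_flatMap.mp hb
    rw [List.eq_of_mem_replicate ha, List.eq_of_mem_replicate hbw]
    exact h1 w hw

-- the counting-sort output is a permutation of the input (values all in 0..10)
theorem pvPerm (xs : List Int) (h : ∀ x ∈ xs, 0 ≤ x ∧ x ≤ 10) :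
    (pvAlphaOrder.flatMap fun v => List.replicate (xs.count v) v).Perm xs := by
  rw [List.perm_iff_count]
  intro a
  by_cases ha : 0 ≤ a ∧ a ≤ 10
  · obtain ⟨ha1, ha2⟩ := ha
    interval_cases a <;>
      simp [pvAlphaOrder, List.count_append, List.count_replicate]
  · have h0 : xs.count a = 0 := List.count_eq_zero.mpr (fun hm => ha (h a hm))
    simp only [pvAlphaOrder, List.flatMap_cons, List.flatMap_nil, List.count_append,
      List.count_replicate, List.count_nil, h0, beq_iff_eq]
    have hne : ∀ v : Int, 0 ≤ v → v ≤ 10 → ¬(v = a) := by omega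
    rw [if_neg (hne 8 (by omega) (by omega)), if_neg (hne 5 (by omega) (by omega)),
      if_neg (hne 4 (by omega) (by omega)), if_neg (hne 9 (by omega) (by omega)),
      if_neg (hne 1 (by omega) (by omega)), if_neg (hne 7 (by omega) (by omega)),
      if_neg (hne 6 (by omega) (by omega)), if_neg (hne 10 (by omega) (by omega)),
      if_neg (hne 3 (by omega) (by omega)), if_neg (hne 2 (by omega) (by omega)),
      if_neg (hne 0 (by omega) (by omega))]

-- the word key separates the admissible values
theorem pvKeyA_antisymm (a b : Int) (ha1 : 0 ≤ a) (ha2 : a ≤ 10) (hb1 : 0 ≤ b) (hb2 : b ≤ 10)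
    (h1 : pvKeyA a ≤ pvKeyA b) (h2 : pvKeyA b ≤ pvKeyA a) : a = b := by
  rw [String.le_iff_toList_le] at h1 h2
  revert h1 h2
  interval_cases a <;> interval_cases b <;> decide

theorem pvMem_flatMap_order (a : Int) (n : Int → Nat)
    (hm : a ∈ pvAlphaOrder.flatMap fun v => List.replicate (n v) v) : 0 ≤ a ∧ a ≤ 10 := by
  obtain ⟨w, hw, haw⟩ := List.mem_flatMap.mp hm
  rw [List.eq_of_mem_replicate haw]
  fin_cases hw <;> omega

theorem pvOrder_pairwise : pvAlphaOrder.Pairwise (fun a b => pvKeyA a ≤ pvKeyA b) := by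
  have hiff : ∀ a b : Int, (pvKeyA a ≤ pvKeyA b) ↔ ((pvKeyA a).toList ≤ (pvKeyA b).toList) :=
    fun a b => String.le_iff_toList_le
  simp only [hiff]
  decide

-- core: A's stable sort by word name IS the counting-sort output
theorem pvSorted_eq (xs : List Int) (h : ∀ x ∈ xs, 0 ≤ x ∧ x ≤ 10) :
    PySem.List.sorted xs pvKeyA
      = pvAlphaOrder.flatMap fun v => List.replicate (xs.count v) v := by
  apply List.Perm.eq_of_pairwise
  · intro a b hma hmb h1 h2
    have ha := h a ((PySem.List.mem_sorted xs pvKeyA false a).mp hma)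
    have hb := pvMem_flatMap_order b _ hmb
    exact pvKeyA_antisymm a b ha.1 ha.2 hb.1 hb.2 h1 h2
  · exact PySem.List.sorted_pairwise xs pvKeyA
  · exact pvPairwise_flatMap _ _ _ pvOrder_pairwise
  · exact (PySem.List.sorted_perm xs pvKeyA false).trans (pvPerm xs h).symm

-- A's "not all in range" test and B's "some out of range" test are the same Bool
theorem pvCond_eq (numbers : List Int) :
    (numbers.any fun n => decide (n < 0 ∨ n > 10))
      = !(numbers.all fun num => decide (0 ≤ num ∧ num ≤ 10)) := by
  induction numbers with
  | nil => rfl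
  | cons x t ih =>
    rw [List.any_cons, List.all_cons, ih]
    by_cases hx : 0 ≤ x ∧ x ≤ 10
    · have : (decide (x < 0 ∨ x > 10)) = false := by simp; omega
      simp [this, hx]
    · have : (decide (x < 0 ∨ x > 10)) = true := by simp; omega
      simp [this, hx]

-- ===== VERDICT (by name: the statement is the Claim_ definition above) =====
theorem sort_numbers_lexicographically_spec : Claim_equal_sort_numbers_lexicographically := by
  intro s _
  unfold Spec_sort_numbers_lexicographically sort_numbers_lexicographically
    sort_numbers_lexicographically_alt
  dsimp only
  cases h1 : ((PySem.Str.split₀ s).map PySem.Int.ofStr?).all Option.isSome with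
  | false => simp only [Bool.false_eq_true, if_false]
  | true =>
    simp only [if_true]
    rw [pvCond_eq]
    cases h2 : (((PySem.Str.split₀ s).map PySem.Int.ofStr?).map (fun o => o.getD 0)).all
        (fun num => decide (0 ≤ num ∧ num ≤ 10)) with
    | false => simp only [Bool.not_false, if_true]
    | true =>
      have hall : ∀ x ∈ ((PySem.Str.split₀ s).map PySem.Int.ofStr?).map (fun o => o.getD 0),
          0 ≤ x ∧ x ≤ 10 := by
        intro x hx
        simpa using List.all_eq_true.mp h2 x hx
      simp only [Bool.not_true, Bool.false_eq_true, if_false]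
      split_ifs with hlen
      · rfl
      · rw [pvB_out_eq, pvSorted_eq _ hall]
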